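-- pv_equiv track=rewrite | github.com/jjorloff1/lxx-nt-greek-bible-builder | generate_nt_latex.py | add_poetryblock_to_quotes
-- ===== SOURCE A (Python) =====
-- def add_poetryblock_to_quotes(lines):
--     output = []
--     in_poetry = False
--
--     for i, line in enumerate(lines):
--         # is_quote_line = line.lstrip().contains(r'\par }{\PP \begin{quote}')
--         if r'\par }{\PP \begin{quote}' in line and not in_poetry:
--             # Start of poetry block
--             output.append(r'\begin{poetryblock}')
--             in_poetry = True
--
--         output.append(line)
--
--         # Check if next line is not a quote line (or end of file)
--         # next_is_quote = (i + 1 < len(lines)) and lines[i + 1].contains(r'\par }{\PP \begin{quote}')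
--         next_is_quote = (i + 1 < len(lines)) and r'\par }{\PP \begin{quote}' in lines[i + 1]
--         if in_poetry and (not next_is_quote or i + 1 == len(lines)):
--             # End of poetry block before the next non-quote line
--             output.append(r'\end{poetryblock}')
--             in_poetry = False
--
--     return output
-- ===== SOURCE B (Python) =====
-- def add_poetryblock_to_quotes(lines):
--     marker = r'\par }{\PP \begin{quote}'
--     output = []
--     i = 0
--     n = len(lines)
--     while i < n:
--         if marker in lines[i]:
--             output.append(r'\begin{poetryblock}')
--             while i < n and marker in lines[i]:
--                 output.append(lines[i])
--                 i += 1
--             output.append(r'\end{poetryblock}')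
--         else:
--             output.append(lines[i])
--             i += 1
--     return output
-- ===== Notes on version B (the rewrite author's own statement) =====
-- stated objective: alternative
-- what changed: Replaces A's flat flag-plus-lookahead state machine (in_poetry flag, peek at lines[i+1]) with explicit run grouping: an outer index loop and a nested inner while that consumes each maximal run of quote lines between begin/end markers.
import Mathlib
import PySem

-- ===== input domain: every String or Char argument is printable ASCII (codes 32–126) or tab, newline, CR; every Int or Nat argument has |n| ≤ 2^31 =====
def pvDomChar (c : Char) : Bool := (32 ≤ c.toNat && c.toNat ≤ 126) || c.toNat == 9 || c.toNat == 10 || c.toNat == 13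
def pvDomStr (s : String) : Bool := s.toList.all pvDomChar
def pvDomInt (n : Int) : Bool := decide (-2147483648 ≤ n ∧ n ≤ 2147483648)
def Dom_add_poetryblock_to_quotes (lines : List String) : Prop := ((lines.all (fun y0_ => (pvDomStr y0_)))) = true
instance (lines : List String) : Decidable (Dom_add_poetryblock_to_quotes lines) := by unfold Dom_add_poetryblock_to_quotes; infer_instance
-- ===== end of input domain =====

-- B rewrites A's flat flag-plus-lookahead state machine as explicit run grouping
-- (an outer index loop with a nested inner while that consumes each maximal run of
-- quote lines); objective: alternative decomposition, same O(n) cost.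

-- ===== PORT A =====
-- shared helper: the test r'\par }{\PP \begin{quote}' in s  (both Pythons perform
-- exactly this membership test)
def apbQuote (s : String) : Bool := PySem.Str.isIn "\\par }{\\PP \\begin{quote}" s

-- the for-loop of A as a structural recursion over the remaining lines with the
-- same state (output accumulator, in_poetry flag); the only uses of the index i
-- are the lookahead lines[i+1] (= head of the remaining tail) and the end-of-list
-- test i+1 == len(lines) (= the tail being empty), transcribed as such.
def apbLoop : List String → Bool → List String → List String
  | acc, _, [] => acc
  | acc, inp, line :: rest =>
    let entered := apbQuote line && !inp
    let acc1 := if entered then acc ++ ["\\begin{poetryblock}"] else acc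
    let inp1 := if entered then true else inp
    let acc2 := acc1 ++ [line]
    let nextIsQuote := match rest with | [] => false | r :: _ => apbQuote r
    if inp1 && (!nextIsQuote || rest.isEmpty) then
      apbLoop (acc2 ++ ["\\end{poetryblock}"]) false rest
    else
      apbLoop acc2 inp1 rest

def add_poetryblock_to_quotes (lines : List String) : List String :=
  apbLoop [] false lines

-- ===== PORT B =====
-- inner `while i < n and marker in lines[i]` loop of Source B: returns the consumed
-- run of quote lines and the remaining lines
def apbRun : List String → List String × List String
  | [] => ([], [])
  | l :: ls =>
    if apbQuote l then ((l :: (apbRun ls).1), (apbRun ls).2)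
    else ([], l :: ls)

theorem apbRun_snd_length_le : ∀ xs : List String, (apbRun xs).2.length ≤ xs.length
  | [] => Nat.le_refl _
  | l :: ls => by
    by_cases h : apbQuote l = true
    · simp only [apbRun, h, if_pos]
      exact Nat.le_succ_of_le (apbRun_snd_length_le ls)
    · simp [apbRun, h]

-- outer `while i < len(lines)` loop of Source B
def apbAlt : List String → List String
  | [] => []
  | l :: ls =>
    if h : apbQuote l = true then
      "\\begin{poetryblock}" ::
        ((apbRun (l :: ls)).1 ++ "\\end{poetryblock}" :: apbAlt ((apbRun (l :: ls)).2))
    else l :: apbAlt ls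
termination_by ls => ls.length
decreasing_by
  · simp only [apbRun, h, if_pos]
    exact Nat.lt_succ_of_le (apbRun_snd_length_le ls)
  · simp

def add_poetryblock_to_quotes_alt (lines : List String) : List String :=
  apbAlt lines

-- ===== PRECONDITION & SPEC =====
def Spec_add_poetryblock_to_quotes (lines : List String) (out : List String) : Prop := out = add_poetryblock_to_quotes_alt lines
instance (lines : List String) (out : List String) : Decidable (Spec_add_poetryblock_to_quotes lines out) := by unfold Spec_add_poetryblock_to_quotes; infer_instance

-- ===== CLAIM (what is proved, stated in full; the proofs are below) =====
def Claim_equal_add_poetryblock_to_quotes : Prop := ∀ (lines : List String), Dom_add_poetryblock_to_quotes lines → Spec_add_poetryblock_to_quotes lines (add_poetryblock_to_quotes lines)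

-- ===== LEMMAS AND PROOFS =====

-- Main invariant, by strong induction on the length of the remaining lines:
-- (i)  with in_poetry = False the loop of A appends exactly apbAlt of the rest;
-- (ii) with in_poetry = True on a remaining list headed by a quote line it appends
--      the current run, the end marker, and apbAlt of what is left.
theorem apb_main : ∀ (n : Nat) (ls : List String), ls.length ≤ n → ∀ acc : List String,
    (apbLoop acc false ls = acc ++ apbAlt ls) ∧
    (∀ l rest, ls = l :: rest → apbQuote l = true →
      apbLoop acc true ls =
        acc ++ ((apbRun ls).1 ++ "\\end{poetryblock}" :: apbAlt ((apbRun ls).2))) := by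
  intro n
  induction n with
  | zero =>
    intro ls hls acc
    have : ls = [] := List.eq_nil_of_length_eq_zero (Nat.le_zero.mp hls)
    subst this
    refine ⟨by simp [apbLoop, apbAlt], ?_⟩
    intro l rest h
    exact absurd h (by simp)
  | succ n ih =>
    intro ls hls acc
    cases ls with
    | nil =>
      refine ⟨by simp [apbLoop, apbAlt], ?_⟩
      intro l rest h
      exact absurd h (by simp)
    | cons x xs =>
      have hxs : xs.length ≤ n := Nat.le_of_succ_le_succ hls
      constructor
      · -- (i) in_poetry = false
        by_cases hq : apbQuote x = true
        · cases xs with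
          | nil =>
            simp [apbLoop, apbAlt, apbRun, hq]
          | cons y ys =>
            by_cases hy : apbQuote y = true
            · have IH := (ih (y :: ys) hxs (acc ++ ["\\begin{poetryblock}", x])).2 y ys rfl hy
              rw [apbLoop.eq_def]
              simp only [hq, hy, if_true, Bool.and_false, Bool.and_true, Bool.not_false,
                Bool.not_true, Bool.or_false, List.isEmpty_cons, Bool.false_eq_true, if_false]
              rw [List.append_assoc] at IH
              rw [show acc ++ ["\\begin{poetryblock}"] ++ [x] = acc ++ ["\\begin{poetryblock}", x] by simp, IH]
              conv_rhs => rw [apbAlt]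
              simp [apbRun, hq, hy]
            · have IH := (ih (y :: ys) hxs
                (acc ++ ["\\begin{poetryblock}", x, "\\end{poetryblock}"])).1
              rw [apbLoop.eq_def]
              simp only [hq, hy, if_true, Bool.and_false, Bool.and_true, Bool.not_false,
                Bool.not_true, Bool.or_false, Bool.true_or, List.isEmpty_cons,
                Bool.false_eq_true, if_false]
              rw [show acc ++ ["\\begin{poetryblock}"] ++ [x] ++ ["\\end{poetryblock}"] =
                    acc ++ ["\\begin{poetryblock}", x, "\\end{poetryblock}"] by simp, IH]
              conv_rhs => rw [apbAlt]
              simp [apbRun, hq, hy, List.append_assoc]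
        · have IH := (ih xs hxs (acc ++ [x])).1
          rw [apbLoop.eq_def]
          simp only [hq, if_true, Bool.and_false, Bool.and_true, Bool.false_and,
            Bool.not_false, Bool.false_eq_true, if_false]
          rw [IH]
          conv_rhs => rw [apbAlt]
          simp [hq]
      · -- (ii) in_poetry = true, head is a quote line
        intro l rest h hq
        cases h
        cases xs with
        | nil =>
          simp [apbLoop, apbAlt, apbRun, hq]
        | cons y ys =>
          by_cases hy : apbQuote y = true
          · have IH := (ih (y :: ys) hxs (acc ++ [x])).2 y ys rfl hy
            rw [apbLoop.eq_def]
            simp only [hq, hy, if_true, Bool.and_false, Bool.and_true, Bool.not_false,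
              Bool.not_true, Bool.or_false, Bool.false_or, Bool.true_and, List.isEmpty_cons,
              Bool.false_eq_true, if_false]
            rw [IH]
            simp [apbRun, hq, hy, List.append_assoc]
          · have IH := (ih (y :: ys) hxs (acc ++ [x, "\\end{poetryblock}"])).1
            rw [apbLoop.eq_def]
            simp only [hq, hy, if_true, Bool.and_false, Bool.and_true, Bool.not_false,
              Bool.not_true, Bool.or_false, Bool.true_or, Bool.true_and, List.isEmpty_cons,
              Bool.false_eq_true, if_false]
            rw [show acc ++ [x] ++ ["\\end{poetryblock}"] = acc ++ [x, "\\end{poetryblock}"] by simp, IH]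
            simp [apbRun, hq, hy, List.append_assoc]

-- ===== VERDICT (by name: the statement is the Claim_ definition above) =====
theorem add_poetryblock_to_quotes_spec : Claim_equal_add_poetryblock_to_quotes := by
  intro lines _
  show add_poetryblock_to_quotes lines = add_poetryblock_to_quotes_alt lines
  have h := (apb_main lines.length lines (Nat.le_refl _) []).1
  simpa [add_poetryblock_to_quotes, add_poetryblock_to_quotes_alt] using h
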